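-- pv_equiv track=rewrite | github.com/payton-chou-ms/e2e-ms-foundry-workshop | scripts/deploy_optional_model.py | build_model_catalog_index
-- ===== SOURCE A (Python) =====
-- def normalize_model_name(model_name: str) -> str:
--     return model_name.strip().casefold()
--
-- def build_model_catalog_index(models: list[dict]) -> dict[str, list[dict]]:
--     catalog_index: dict[str, list[dict]] = {}
--
--     for item in models:
--         model_name = str(item.get("name") or "").strip()
--         if not model_name:
--             continue
--
--         catalog_index.setdefault(
--             normalize_model_name(model_name), []).append(item)
--
--     return catalog_index
-- ===== SOURCE B (Python) =====
-- def normalize_model_name(model_name: str) -> str: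
--     return model_name.strip().casefold()
--
--
-- def build_model_catalog_index(models: list[dict]) -> dict[str, list[dict]]:
--     # One tagging pass, then an ordered key list, then one filter per key:
--     # group-by-key built from the tagged sequence instead of incremental
--     # setdefault/append accumulation into a dict.
--     tagged = []
--     for item in models:
--         model_name = str(item.get("name") or "").strip()
--         if model_name:
--             tagged.append((normalize_model_name(model_name), item))
--     keys = list(dict.fromkeys(key for key, _ in tagged))
--     return {key: [item for k, item in tagged if k == key] for key in keys}
-- ===== Notes on version B (the rewrite author's own statement) =====
-- stated objective: alternative
-- what changed: Replaces A's incremental setdefault/append accumulation into a dict by a group-by pipeline: one tagging pass producing (normalized_key, item) pairs, an ordered dedup of the keys, and one filter per key assembling the result.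
import Mathlib
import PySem

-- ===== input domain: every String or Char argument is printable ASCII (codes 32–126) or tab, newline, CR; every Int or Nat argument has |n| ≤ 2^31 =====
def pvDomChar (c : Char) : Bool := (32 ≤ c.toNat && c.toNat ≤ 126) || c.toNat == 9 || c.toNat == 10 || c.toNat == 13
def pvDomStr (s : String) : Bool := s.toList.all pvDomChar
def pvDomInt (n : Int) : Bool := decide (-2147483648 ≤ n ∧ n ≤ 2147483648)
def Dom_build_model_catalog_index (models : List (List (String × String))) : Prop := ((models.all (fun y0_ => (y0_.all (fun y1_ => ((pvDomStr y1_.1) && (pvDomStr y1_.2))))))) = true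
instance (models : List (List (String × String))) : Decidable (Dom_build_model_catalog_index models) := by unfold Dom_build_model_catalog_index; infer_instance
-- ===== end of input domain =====

-- B groups by a sort-free group-by pipeline (tag, dedup keys, filter per key) instead of
-- A's incremental setdefault/append dict accumulation; equal output, key order preserved.

-- ===== PORT A =====
-- `item.get("name") or ""`: get? is none when "name" is missing, and `or` sends both
-- none and "" to "", which is exactly `getD ""`; `str()` on a string is the identity;
-- `casefold` agrees with `lower` on the ASCII strings Dom admits.
-- `catalog_index.setdefault(key, []).append(item)` is `Dict.modify key [] (· ++ [item])`.
def build_model_catalog_index (models : List (List (String × String))) : List (String × List (List (String × String))) :=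
  (models.foldl
    (fun (catalog_index : PySem.Dict String (List (List (String × String)))) item =>
      let model_name := PySem.Str.strip (((PySem.Dict.mk item).get? "name").getD "")
      if model_name = "" then catalog_index
      else PySem.Dict.modify catalog_index
             (PySem.Str.lower (PySem.Str.strip model_name)) []
             (fun xs => xs ++ [item]))
    PySem.Dict.empty).items

-- ===== PORT B =====
-- the loop body of Source B: tag an item with its normalized key, or drop it
def pvTag (item : List (String × String)) : Option (String × List (String × String)) :=
  let model_name := PySem.Str.strip (((PySem.Dict.mk item).get? "name").getD "")
  if model_name = "" then none
  else some (PySem.Str.lower (PySem.Str.strip model_name), item)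

def build_model_catalog_index_alt (models : List (List (String × String))) : List (String × List (List (String × String))) :=
  let tagged := models.filterMap pvTag
  let keys := PySem.List.dedup (tagged.map Prod.fst)
  keys.map (fun key => (key, (tagged.filter (fun p => p.1 == key)).map Prod.snd))

-- ===== PRECONDITION & SPEC =====
def Spec_build_model_catalog_index (models : List (List (String × String))) (out : List (String × List (List (String × String)))) : Prop := out = build_model_catalog_index_alt models
instance (models : List (List (String × String))) (out : List (String × List (List (String × String)))) : Decidable (Spec_build_model_catalog_index models out) := by unfold Spec_build_model_catalog_index; infer_instance

-- ===== CLAIM (what is proved, stated in full; the proofs are below) =====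
def Claim_equal_build_model_catalog_index : Prop := ∀ (models : List (List (String × String))), Dom_build_model_catalog_index models → Spec_build_model_catalog_index models (build_model_catalog_index models)

-- ===== LEMMAS AND PROOFS =====

-- A's accumulation step, on an already-tagged pair
def pvStep (d : PySem.Dict String (List (List (String × String)))) (p : String × List (String × String)) : PySem.Dict String (List (List (String × String))) :=
  PySem.Dict.modify d p.1 [] (fun xs => xs ++ [p.2])

-- B's group-by, as a function of the tagged list
def pvG (ts : List (String × List (String × String))) : List (String × List (List (String × String))) :=
  (PySem.List.dedup (ts.map Prod.fst)).map
    (fun key => (key, (ts.filter (fun p => p.1 == key)).map Prod.snd))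

theorem pvFilter_nil (ts : List (String × List (String × String))) (k : String)
    (h : k ∉ ts.map Prod.fst) : ts.filter (fun p => p.1 == k) = [] := by
  rw [List.filter_eq_nil_iff]
  intro p hp hbeq
  exact h (List.mem_map.2 ⟨p, hp, by simpa using hbeq⟩)

theorem pvFind_map (ts : List (String × List (String × String))) (k : String) :
    ∀ l : List String,
      ((l.map (fun key => (key, (ts.filter (fun p => p.1 == key)).map Prod.snd))).find?
          (fun p => p.1 == k))
        = if k ∈ l then some (k, (ts.filter (fun p => p.1 == k)).map Prod.snd) else none := by
  intro l
  induction l with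
  | nil => simp
  | cons a l ih =>
    by_cases hak : a = k
    · subst hak; simp
    · simp only [List.map_cons, List.find?_cons]
      have : ((a, (ts.filter (fun p => p.1 == a)).map Prod.snd).1 == k) = false := by
        simpa using hak
      rw [this, ih]
      simp [List.mem_cons, Ne.symm hak]

theorem pvGetD (ts : List (String × List (String × String))) (k : String) :
    (PySem.Dict.mk (pvG ts)).getD k [] = (ts.filter (fun p => p.1 == k)).map Prod.snd := by
  show (((PySem.Dict.mk (pvG ts)).get? k).getD []) = _
  show ((((pvG ts).find? (fun p => p.1 == k)).map Prod.snd).getD []) = _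
  rw [pvG, pvFind_map ts k]
  by_cases h : k ∈ PySem.List.dedup (ts.map Prod.fst)
  · rw [if_pos h]; rfl
  · rw [if_neg h]
    have h' : k ∉ ts.map Prod.fst := fun hm => h ((PySem.List.mem_dedup _ _).2 hm)
    simp [pvFilter_nil ts k h']

theorem pvContains (ts : List (String × List (String × String))) (k : String) :
    (PySem.Dict.mk (pvG ts)).contains k = decide (k ∈ ts.map Prod.fst) := by
  show ((pvG ts).any (fun p => p.1 == k)) = _
  rw [pvG, List.any_map]
  have : ((PySem.List.dedup (ts.map Prod.fst)).any
      ((fun p => p.1 == k) ∘ fun key => (key, (ts.filter (fun p => p.1 == key)).map Prod.snd)))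
      = (PySem.List.dedup (ts.map Prod.fst)).any (fun key => key == k) := rfl
  rw [this]
  by_cases h : k ∈ ts.map Prod.fst
  · have hm : k ∈ PySem.List.dedup (ts.map Prod.fst) := (PySem.List.mem_dedup _ _).2 h
    simp only [h, decide_true, List.any_eq_true]
    exact ⟨k, hm, by simp⟩
  · have : k ∉ PySem.List.dedup (ts.map Prod.fst) := fun hm => h ((PySem.List.mem_dedup _ _).1 hm)
    simp only [h, decide_false]
    rw [List.any_eq_false]
    intro a ha hbeq
    exact this ((eq_of_beq hbeq) ▸ ha)

theorem pvG_append (ts : List (String × List (String × String))) (k : String)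
    (it : List (String × String)) :
    pvG (ts ++ [(k, it)]) =
      if k ∈ ts.map Prod.fst then
        (pvG ts).map (fun p =>
          if p.1 == k then (k, (ts.filter (fun q => q.1 == k)).map Prod.snd ++ [it]) else p)
      else pvG ts ++ [(k, [it])] := by
  have hkeys : (ts ++ [(k, it)]).map Prod.fst = ts.map Prod.fst ++ [k] := by simp
  rw [pvG, hkeys, PySem.List.dedup_eq_ofList, PySem.Set.ofList_append_singleton,
    PySem.Set.add]
  by_cases hk : k ∈ ts.map Prod.fst
  · have hc : (PySem.Set.ofList (ts.map Prod.fst)).contains k = true := by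
      have : k ∈ PySem.Set.ofList (ts.map Prod.fst) := by
        rw [← PySem.List.dedup_eq_ofList]; exact (PySem.List.mem_dedup _ _).2 hk
      simpa [List.contains_iff_mem] using this
    rw [if_pos hc, if_pos hk, pvG, PySem.List.dedup_eq_ofList, List.map_map]
    apply List.map_congr_left
    intro key _
    by_cases hkey : key = k
    · subst hkey; simp [List.filter_append]
    · have h1 : ((key, (ts.filter (fun p => p.1 == key)).map Prod.snd).1 == k) = false := by
        simpa using hkey
      simp only [Function.comp_apply, h1, Bool.false_eq_true, if_false]
      have h2 : (ts ++ [(k, it)]).filter (fun p => p.1 == key)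
          = ts.filter (fun p => p.1 == key) := by
        rw [List.filter_append]
        have : [(k, it)].filter (fun p => p.1 == key) = [] := by
          simp [Ne.symm hkey]
        rw [this, List.append_nil]
      rw [h2]
  · have hc : (PySem.Set.ofList (ts.map Prod.fst)).contains k = false := by
      have : k ∉ PySem.Set.ofList (ts.map Prod.fst) := by
        rw [← PySem.List.dedup_eq_ofList]
        exact fun hm => hk ((PySem.List.mem_dedup _ _).1 hm)
      simpa [List.contains_iff_mem] using this
    rw [if_neg (by rw [hc]; simp), if_neg hk, List.map_append]
    congr 1
    · rw [pvG, PySem.List.dedup_eq_ofList]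
      apply List.map_congr_left
      intro key hkeym
      have hkey : key ≠ k := by
        intro h; apply hk
        have hmem : key ∈ PySem.Set.ofList (ts.map Prod.fst) := hkeym
        rw [← PySem.List.dedup_eq_ofList] at hmem
        exact h ▸ (PySem.List.mem_dedup _ _).1 hmem
      have h2 : (ts ++ [(k, it)]).filter (fun p => p.1 == key)
          = ts.filter (fun p => p.1 == key) := by
        rw [List.filter_append]
        have : [(k, it)].filter (fun p => p.1 == key) = [] := by
          simp [Ne.symm hkey]
        rw [this, List.append_nil]
      rw [h2]
    · simp [List.filter_append, pvFilter_nil ts k hk]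

theorem pvMain (ts : List (String × List (String × String))) :
    (ts.foldl pvStep PySem.Dict.empty).items = pvG ts := by
  induction ts using List.reverseRecOn with
  | nil => rfl
  | append_singleton ts p ih =>
    obtain ⟨k, it⟩ := p
    rw [List.foldl_append, List.foldl_cons, List.foldl_nil]
    have hd : ts.foldl pvStep PySem.Dict.empty = PySem.Dict.mk (pvG ts) := PySem.Dict.ext ih
    rw [hd]
    show (PySem.Dict.modify (PySem.Dict.mk (pvG ts)) k [] (fun xs => xs ++ [it])).items = _
    rw [PySem.Dict.modify, pvGetD, PySem.Dict.insert, pvContains, pvG_append]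
    by_cases hk : k ∈ ts.map Prod.fst
    · simp [hk]
    · rw [pvFilter_nil ts k hk]
      simp [hk]

-- A's loop body equals pvStep applied through the tagging function
theorem pvFold_eq (models : List (List (String × String))) :
    build_model_catalog_index models
      = ((models.filterMap pvTag).foldl pvStep PySem.Dict.empty).items := by
  rw [build_model_catalog_index, List.foldl_filterMap]
  congr 1
  congr 1
  funext d item
  by_cases h : PySem.Str.strip (((PySem.Dict.mk item).get? "name").getD "") = ""
  · simp [pvTag, h]
  · simp [pvTag, pvStep, h]

-- ===== VERDICT (by name: the statement is the Claim_ definition above) =====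
theorem build_model_catalog_index_spec : Claim_equal_build_model_catalog_index := by
  intro models _
  show build_model_catalog_index models = build_model_catalog_index_alt models
  rw [pvFold_eq, pvMain, build_model_catalog_index_alt]
  rfl
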